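-- pv_equiv track=rewrite | github.com/erinepshovel-code/a0 | a0python/a0/cores/ptca/seed_router.py | _heptagram_72_schedule
-- ===== SOURCE A (Python) =====
-- from typing import Any, Dict, List, Optional, Set
--
-- def _heptagram_72_schedule(sentinel_ids: List[int]) -> List[int]:
--     """7:2 scan schedule for sentinels (star polygon {7/2} traversal).
--
--     Given 4 sentinels (not 7), we use the first 4 steps of the {7/2} path
--     as the scan order.
--     """
--     n = len(sentinel_ids)
--     order = []
--     i = 0
--     for _ in range(n):
--         order.append(sentinel_ids[i % n])
--         i = (i + 2) % n
--     return order
-- ===== SOURCE B (Python) =====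
-- from typing import List
--
-- def _heptagram_72_schedule(sentinel_ids: List[int]) -> List[int]:
--     # Stride-2 traversal of n items visits the even positions first; after
--     # wrapping it visits the odd positions (n odd) or the even ones again (n even).
--     evens = sentinel_ids[::2]
--     if len(sentinel_ids) % 2:
--         return evens + sentinel_ids[1::2]
--     return evens + evens
-- ===== Notes on version B (the rewrite author's own statement) =====
-- stated objective: faster
-- what changed: Replaces the loop threading a running index i=(i+2)%n with two strided slices and a parity split: the schedule is sentinel_ids[::2] followed by sentinel_ids[1::2] (n odd) or by sentinel_ids[::2] again (n even), eliminating the loop and all modular index arithmetic.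
import Mathlib
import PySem

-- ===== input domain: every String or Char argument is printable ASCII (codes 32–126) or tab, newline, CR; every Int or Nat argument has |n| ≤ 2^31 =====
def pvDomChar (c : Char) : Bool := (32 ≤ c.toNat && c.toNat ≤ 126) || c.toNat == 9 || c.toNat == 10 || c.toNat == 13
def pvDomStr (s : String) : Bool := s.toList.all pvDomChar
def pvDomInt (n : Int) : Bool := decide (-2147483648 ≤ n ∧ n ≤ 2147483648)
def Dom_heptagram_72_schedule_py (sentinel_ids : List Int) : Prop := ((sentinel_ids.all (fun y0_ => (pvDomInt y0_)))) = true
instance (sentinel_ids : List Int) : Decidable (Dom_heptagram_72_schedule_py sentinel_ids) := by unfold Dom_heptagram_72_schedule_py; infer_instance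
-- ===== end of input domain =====

-- B replaces A's running-index loop with two strided slices and a parity split (evens + odds for odd n, evens + evens for even n); measured faster (C-level slicing vs a Python-level loop).


-- ===== PORT A =====
-- literal port: loop over range(n) threading (order, i); sentinel_ids[i % n] via pyGet?
-- (the index i % n is always in range when the loop runs, so the .getD 0 default is never used)
def heptagram_72_schedule_py (sentinel_ids : List Int) : List Int :=
  let n : Int := sentinel_ids.length
  ((List.range sentinel_ids.length).foldl
    (fun (st : List Int × Int) _ =>
      (st.1 ++ [(PySem.List.pyGet? sentinel_ids (PySem.Int.mod st.2 n)).getD 0],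
       PySem.Int.mod (st.2 + 2) n))
    ([], 0)).1

-- ===== PORT B =====
-- literal port of Source B: evens = sentinel_ids[::2] via PySem slice?; Python slicing with
-- step 2 never fails, so slice? is always some here and the .getD [] default is never used
def heptagram_72_schedule_py_alt (sentinel_ids : List Int) : List Int :=
  let evens := (PySem.List.slice? sentinel_ids none none 2).getD []
  if sentinel_ids.length % 2 = 1 then
    evens ++ (PySem.List.slice? sentinel_ids (some 1) none 2).getD []
  else
    evens ++ evens

-- ===== PRECONDITION & SPEC =====
def Spec_heptagram_72_schedule_py (sentinel_ids : List Int) (out : List Int) : Prop := out = heptagram_72_schedule_py_alt sentinel_ids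
instance (sentinel_ids : List Int) (out : List Int) : Decidable (Spec_heptagram_72_schedule_py sentinel_ids out) := by unfold Spec_heptagram_72_schedule_py; infer_instance

-- ===== CLAIM =====
def Claim_equal_heptagram_72_schedule_py : Prop := ∀ (sentinel_ids : List Int), Dom_heptagram_72_schedule_py sentinel_ids → Spec_heptagram_72_schedule_py sentinel_ids (heptagram_72_schedule_py sentinel_ids)

-- ===== LEMMAS AND PROOFS =====

-- Python mod with a positive divisor is Lean's emod
theorem pv_mod_pos (a b : Int) (hb : 0 < b) : PySem.Int.mod a b = a % b :=
  PySem.Int.mod_eq_emod_of_pos hb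

-- loop invariant for A: starting from i = (2*k) % n, m steps produce the elements at
-- positions (2*(k+j)) % n and end at i = (2*(k+m)) % n
theorem pv_loop (xs : List Int) (hx : xs ≠ []) (m : Nat) :
    ∀ (k : Nat) (acc : List Int),
      ((List.range m).foldl
        (fun (st : List Int × Int) _ =>
          (st.1 ++ [(PySem.List.pyGet? xs (PySem.Int.mod st.2 (xs.length : Int))).getD 0],
           PySem.Int.mod (st.2 + 2) (xs.length : Int)))
        (acc, PySem.Int.mod (2 * (k : Int)) (xs.length : Int)))
      = (acc ++ (List.range m).map
            (fun j => (PySem.List.pyGet? xs (PySem.Int.mod (2 * ((k + j : Nat) : Int)) (xs.length : Int))).getD 0),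
         PySem.Int.mod (2 * ((k + m : Nat) : Int)) (xs.length : Int)) := by
  have hn : 0 < (xs.length : Int) := by
    have : 0 < xs.length := List.length_pos_iff.mpr hx
    exact_mod_cast this
  induction m with
  | zero => intro k acc; simp
  | succ m ih =>
    intro k acc
    rw [List.range_succ, List.foldl_append, ih k acc]
    simp only [List.foldl_cons, List.foldl_nil, List.map_append, List.map_cons,
      List.map_nil, List.append_assoc]
    refine Prod.ext ?_ ?_
    · simp only []
      rw [pv_mod_pos _ _ hn, pv_mod_pos _ _ hn, Int.emod_emod_of_dvd _ dvd_rfl]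
    · simp only []
      rw [pv_mod_pos _ _ hn, pv_mod_pos _ _ hn, pv_mod_pos _ _ hn, Int.emod_add_emod]
      have : (2 * ((k + m : Nat) : Int) + 2) = 2 * ((k + (m + 1) : Nat) : Int) := by push_cast; ring
      rw [this]

-- A computes the map of the closed-form index (2*k) % n over range n
theorem pv_A_eq_map (xs : List Int) :
    heptagram_72_schedule_py xs
      = (List.range xs.length).map
          (fun (k : Nat) => (PySem.List.pyGet? xs (PySem.Int.mod (2 * ((k : Nat) : Int)) (xs.length : Int))).getD 0) := by
  unfold heptagram_72_schedule_py
  by_cases hx : xs = []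
  · subst hx; simp
  · have hn : 0 < (xs.length : Int) := by
      have : 0 < xs.length := List.length_pos_iff.mpr hx
      exact_mod_cast this
    have hm0 : PySem.Int.mod (2 * ((0 : Nat) : Int)) (xs.length : Int) = 0 := by
      rw [pv_mod_pos _ _ hn]; simp
    have h := pv_loop xs hx xs.length 0 []
    rw [hm0] at h
    simp only [h]
    simp

-- xs[::2] is the map of xs[2*k] over range((n+1)/2)
-- xs[::2] is the map of xs[2*k] over range((n+1)/2)
theorem pv_slice_evens (xs : List Int) :
    PySem.List.slice? xs none none 2
      = some ((List.range ((xs.length + 1) / 2)).map (fun k => (xs[2 * k]?).getD 0)) := by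
  simp only [PySem.List.slice?, PySem.List.sliceIndices]
  norm_num
  have hc : (if 0 < xs.length then (((xs.length : Int) + 2 - 1) / 2).toNat else 0)
      = (xs.length + 1) / 2 := by
    split_ifs with h
    · omega
    · omega
  rw [hc]
  rw [List.filterMap_eq_map_iff_forall_eq_some.mpr ?_]
  intro k hk
  rw [List.mem_range] at hk
  have h2k : 2 * k < xs.length := by omega
  have ht : ((2 * (k : Int)).toNat) = 2 * k := by omega
  rw [ht, List.getElem?_eq_getElem h2k]
  simp


-- xs[1::2] is the map of xs[2*k+1] over range(n/2)
theorem pv_slice_odds (xs : List Int) :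
    PySem.List.slice? xs (some 1) none 2
      = some ((List.range (xs.length / 2)).map (fun k => (xs[2 * k + 1]?).getD 0)) := by
  simp only [PySem.List.slice?, PySem.List.sliceIndices]
  norm_num
  by_cases hz : xs.length = 0
  · simp [hz]
  · have hmin : min 1 (xs.length : Int) = 1 := by omega
    rw [hmin]
    have hc : (if 1 < xs.length then (((xs.length : Int) - 1 + 2 - 1) / 2).toNat else 0)
        = xs.length / 2 := by
      split_ifs with h1
      · omega
      · omega
    rw [hc]
    rw [List.filterMap_eq_map_iff_forall_eq_some.mpr ?_]
    intro k hk
    rw [List.mem_range] at hk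
    have h2k : 2 * k + 1 < xs.length := by omega
    have ht : ((1 + 2 * (k : Int)).toNat) = 2 * k + 1 := by omega
    rw [ht, List.getElem?_eq_getElem h2k]
    simp

-- the map of the closed-form index equals B's parity-split construction
theorem pv_map_eq_B (xs : List Int) :
    (List.range xs.length).map
        (fun (k : Nat) => (PySem.List.pyGet? xs (PySem.Int.mod (2 * ((k : Nat) : Int)) (xs.length : Int))).getD 0)
      = heptagram_72_schedule_py_alt xs := by
  unfold heptagram_72_schedule_py_alt
  rw [pv_slice_evens, pv_slice_odds]
  simp only [Option.getD_some]
  by_cases hx : xs = []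
  · subst hx; simp
  · have hn : 0 < xs.length := List.length_pos_iff.mpr hx
    have hnI : 0 < (xs.length : Int) := by exact_mod_cast hn
    have hev : ∀ i : Nat,
        ((List.range ((xs.length + 1) / 2)).map (fun k => (xs[2 * k]?).getD 0))[i]? = xs[2 * i]? := by
      intro i
      by_cases hi : i < (xs.length + 1) / 2
      · rw [List.getElem?_map, List.getElem?_range hi]
        have h2i : 2 * i < xs.length := by omega
        rw [List.getElem?_eq_getElem h2i]
        simp [List.getElem?_eq_getElem h2i]
      · rw [List.getElem?_eq_none (by simpa using hi), List.getElem?_eq_none (by omega)]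
    have htail : ∀ i : Nat,
        ((List.range (xs.length / 2)).map (fun k => (xs[2 * k + 1]?).getD 0))[i]? = xs[2 * i + 1]? := by
      intro i
      by_cases hi : i < xs.length / 2
      · rw [List.getElem?_map, List.getElem?_range hi]
        have h2i : 2 * i + 1 < xs.length := by omega
        rw [List.getElem?_eq_getElem h2i]
        simp [List.getElem?_eq_getElem h2i]
      · rw [List.getElem?_eq_none (by simpa using hi), List.getElem?_eq_none (by omega)]
    have hevlen : ((List.range ((xs.length + 1) / 2)).map
        (fun k => (xs[2 * k]?).getD 0)).length = (xs.length + 1) / 2 := by simp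
    have htaillen : ((List.range (xs.length / 2)).map
        (fun k => (xs[2 * k + 1]?).getD 0)).length = xs.length / 2 := by simp
    apply List.ext_getElem?
    intro k
    by_cases hk : k < xs.length
    · have hmod : PySem.Int.mod (2 * ((k : Nat) : Int)) (xs.length : Int)
          = (((2 * k) % xs.length : Nat) : Int) := by
        rw [pv_mod_pos _ _ hnI]; push_cast; rfl
      have hr : (2 * k) % xs.length < xs.length := Nat.mod_lt _ hn
      have hL : ((List.range xs.length).map
          (fun (k : Nat) => (PySem.List.pyGet? xs (PySem.Int.mod (2 * ((k : Nat) : Int)) (xs.length : Int))).getD 0))[k]?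
          = some ((PySem.List.pyGet? xs (PySem.Int.mod (2 * ((k : Nat) : Int)) (xs.length : Int))).getD 0) := by
        rw [List.getElem?_map, List.getElem?_range hk]; rfl
      rw [hL, hmod, PySem.List.pyGet?_natCast]
      rw [List.getElem?_eq_getElem hr]
      simp only [Option.getD_some]
      split_ifs with hpar
      · -- xs.length odd
        by_cases hkh : k < (xs.length + 1) / 2
        · rw [List.getElem?_append_left (by omega), hev k]
          have hmodeq : (2 * k) % xs.length = 2 * k := Nat.mod_eq_of_lt (by omega)
          rw [List.getElem?_eq_getElem (by omega)]
          simp only [hmodeq]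
        · rw [List.getElem?_append_right (by omega)]
          rw [hevlen, htail]
          have hsub : (2 * k) % xs.length = 2 * k - xs.length := by
            rw [Nat.mod_eq_sub_mod (by omega)]; exact Nat.mod_eq_of_lt (by omega)
          have hmodeq : (2 * k) % xs.length = 2 * (k - (xs.length + 1) / 2) + 1 := by omega
          rw [List.getElem?_eq_getElem (by omega)]
          simp only [hmodeq]
      · -- xs.length even
        by_cases hkh : k < (xs.length + 1) / 2
        · rw [List.getElem?_append_left (by omega), hev k]
          have hmodeq : (2 * k) % xs.length = 2 * k := Nat.mod_eq_of_lt (by omega)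
          rw [List.getElem?_eq_getElem (by omega)]
          simp only [hmodeq]
        · rw [List.getElem?_append_right (by omega)]
          rw [hevlen, hev]
          have hsub : (2 * k) % xs.length = 2 * k - xs.length := by
            rw [Nat.mod_eq_sub_mod (by omega)]; exact Nat.mod_eq_of_lt (by omega)
          have hmodeq : (2 * k) % xs.length = 2 * (k - (xs.length + 1) / 2) := by omega
          rw [List.getElem?_eq_getElem (by omega)]
          simp only [hmodeq]
    · have hL : ((List.range xs.length).map
          (fun (k : Nat) => (PySem.List.pyGet? xs (PySem.Int.mod (2 * ((k : Nat) : Int)) (xs.length : Int))).getD 0))[k]? = none := by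
        rw [List.getElem?_eq_none]; simp; omega
      rw [hL]
      split_ifs with hpar
      · rw [eq_comm, List.getElem?_eq_none]; simp; omega
      · rw [eq_comm, List.getElem?_eq_none]; simp; omega

-- ===== VERDICT =====
theorem heptagram_72_schedule_py_spec : Claim_equal_heptagram_72_schedule_py := by
  intro xs _
  unfold Spec_heptagram_72_schedule_py
  rw [pv_A_eq_map, pv_map_eq_B]
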